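-- pv_equiv track=rewrite | github.com/errros/Vignette2CS-2 | src/main/api/main.py | symbol
-- ===== SOURCE A (Python) =====
-- def symbol(part, sym):
--     ddf = part.split(sym)[1]
--     if len(ddf) > 2 and ddf[2] == '1':
--         ddf = ddf[:2] + '/' + ddf[3:]
--         return ddf
--     if '-' in ddf:
--         ddf = ddf.replace("-", "/")
--         return ddf
--
--     else:
--         for month, value in month_mapping.items():
--             if month in ddf:
--                 ddf = ddf.replace(month, value)
--         return ddf
--
-- month_mapping = {
--     'jan': '01/', 'feb': '02/', 'mar': '03/', 'apr': '04/', 'mai': '05/', 'jun': '06/',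
--     'jul': '07/', 'aug': '08/', 'sep': '09/', 'oct': '10/', 'nov': '11/', 'dec': '12/'
-- }
-- ===== SOURCE B (Python) =====
-- # Alternative: the 12 sequential month-replace passes become ONE left-to-right scan that
-- # looks the 3-char window up in a list of month names and formats index+1 as the value;
-- # the guard branches are rewritten via slicing.  Return value identical to A on its domain.
-- MONTH_NAMES = ['jan', 'feb', 'mar', 'apr', 'mai', 'jun',
--                'jul', 'aug', 'sep', 'oct', 'nov', 'dec']
--
-- def symbol(part, sym):
--     ddf = part.split(sym)[1]
--     if ddf[2:3] == '1':
--         return ddf[:2] + '/' + ddf[3:]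
--     if '-' in ddf:
--         return ddf.replace('-', '/')
--     out = ''
--     i = 0
--     while i < len(ddf):
--         w = ddf[i:i+3]
--         if w in MONTH_NAMES:
--             out += '%02d/' % (MONTH_NAMES.index(w) + 1)
--             i += 3
--         else:
--             out += ddf[i]
--             i += 1
--     return out
-- ===== Notes on version B (the rewrite author's own statement) =====
-- stated objective: alternative
-- what changed: The final branch's 12 sequential full-string replace passes over month_mapping are replaced by one left-to-right scan that looks the 3-character window up in a list of month names and formats index+1 as '%02d/'; the first guard is rewritten as a slice comparison ddf[2:3] == '1'.
import Mathlib
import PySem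

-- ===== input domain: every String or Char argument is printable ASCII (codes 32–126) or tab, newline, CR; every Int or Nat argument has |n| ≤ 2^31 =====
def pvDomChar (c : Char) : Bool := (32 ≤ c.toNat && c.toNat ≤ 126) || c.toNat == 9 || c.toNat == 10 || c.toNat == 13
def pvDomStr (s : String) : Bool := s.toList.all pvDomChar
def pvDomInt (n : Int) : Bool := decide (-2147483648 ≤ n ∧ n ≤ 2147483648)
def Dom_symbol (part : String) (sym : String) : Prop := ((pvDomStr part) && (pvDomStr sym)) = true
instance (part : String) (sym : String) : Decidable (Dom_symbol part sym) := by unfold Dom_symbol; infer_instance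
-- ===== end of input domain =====

-- B replaces A's 12 sequential month-replace passes by ONE left-to-right scan that looks the
-- 3-char window up in a month-name list and formats index+1 (objective: alternative algorithm;
-- same observable return value).

-- ===== PORT A =====
-- month_mapping, in insertion order
def monthPairsA : List (List Char × List Char) :=
  [(['j','a','n'], ['0','1','/']), (['f','e','b'], ['0','2','/']), (['m','a','r'], ['0','3','/']),
   (['a','p','r'], ['0','4','/']), (['m','a','i'], ['0','5','/']), (['j','u','n'], ['0','6','/']),
   (['j','u','l'], ['0','7','/']), (['a','u','g'], ['0','8','/']), (['s','e','p'], ['0','9','/']),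
   (['o','c','t'], ['1','0','/']), (['n','o','v'], ['1','1','/']), (['d','e','c'], ['1','2','/'])]

-- A's for-loop: for month, value in month_mapping.items(): if month in ddf: ddf = ddf.replace(month, value)
def symbolLoopA (ddf : List Char) : List Char :=
  monthPairsA.foldl
    (fun s p => if PySem.Chars.isIn p.1 s then PySem.Chars.replace s p.1 p.2 else s) ddf

def symbolCoreA (ddf : List Char) : List Char :=
  if 2 < ddf.length ∧ PySem.List.pyGet? ddf 2 = some '1' then
    PySem.List.slice ddf none (some 2) ++ ['/'] ++ PySem.List.slice ddf (some 3) none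
  else if PySem.Chars.isIn ['-'] ddf then
    PySem.Chars.replace ddf ['-'] ['/']
  else symbolLoopA ddf

def symbol (part : String) (sym : String) : String :=
  match PySem.Chars.split? part.toList sym.toList with
  | none => ""            -- sym = "": Python raises ValueError (excluded by Pre_symbol)
  | some parts =>
    match PySem.List.pyGet? parts 1 with
    | none => ""          -- sym not in part: Python raises IndexError (excluded by Pre_symbol)
    | some ddf => String.ofList (symbolCoreA ddf)

-- ===== PORT B =====
-- MONTH_NAMES of Source B
def monthNamesB : List (List Char) :=
  [['j','a','n'], ['f','e','b'], ['m','a','r'], ['a','p','r'], ['m','a','i'], ['j','u','n'],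
   ['j','u','l'], ['a','u','g'], ['s','e','p'], ['o','c','t'], ['n','o','v'], ['d','e','c']]

-- '%02d/' % m, exact for 0 ≤ m ≤ 99 (here m is 1..12)
def fmt2B (m : Nat) : List Char := [Char.ofNat (48 + m / 10), Char.ofNat (48 + m % 10), '/']

-- Source B's 'w in MONTH_NAMES' + 'MONTH_NAMES.index(w)' as one first-match position search
def idxB : List (List Char) → Nat → List Char → Option Nat
  | [], _, _ => none
  | m :: rest, i, w => if w = m then some i else idxB rest (i + 1) w

-- Source B's while loop: take the 3-char window ddf[i:i+3]; if it is a month name, emit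
-- '%02d/' % (index+1) and skip 3, else copy one character
def scanB : List Char → List Char
  | [] => []
  | c :: t =>
    match idxB monthNamesB 0 (List.take 3 (c :: t)) with
    | some k => fmt2B (k + 1) ++ scanB (List.drop 2 t)
    | none => c :: scanB t
termination_by l => l.length
decreasing_by
  · simp only [List.length_cons, List.length_drop]; omega
  · simp only [List.length_cons]; omega

def symbolCoreB (ddf : List Char) : List Char :=
  if PySem.List.slice ddf (some 2) (some 3) = ['1'] then
    PySem.List.slice ddf none (some 2) ++ ['/'] ++ PySem.List.slice ddf (some 3) none
  else if PySem.Chars.isIn ['-'] ddf then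
    PySem.Chars.replace ddf ['-'] ['/']
  else scanB ddf

def symbol_alt (part : String) (sym : String) : String :=
  match (PySem.Chars.split? part.toList sym.toList).bind
      (fun parts => PySem.List.pyGet? parts 1) with
  | none => ""            -- sym = "" or sym not in part: Python raises (excluded by Pre_symbol)
  | some ddf => String.ofList (symbolCoreB ddf)

-- ===== PRECONDITION & SPEC =====
-- Pre_ excludes exactly the inputs where Python A raises: sym = "" (ValueError from split) and
-- sym not occurring in part (IndexError from [1]).
def Pre_symbol (part : String) (sym : String) : Prop :=
  sym ≠ "" ∧ PySem.Str.isIn sym part = true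
instance (part : String) (sym : String) : Decidable (Pre_symbol part sym) := by
  unfold Pre_symbol; infer_instance

def pvWitness_symbol : String × String := ("x:25nov99", ":")

def Spec_symbol (part : String) (sym : String) (out : String) : Prop := out = symbol_alt part sym
instance (part : String) (sym : String) (out : String) : Decidable (Spec_symbol part sym out) := by
  unfold Spec_symbol; infer_instance

-- ===== CLAIM (what is proved, stated in full; the proofs are below) =====
def Claim_equal_symbol : Prop := ∀ (part : String) (sym : String), Dom_symbol part sym → Pre_symbol part sym → Spec_symbol part sym (symbol part sym)

-- ===== LEMMAS AND PROOFS =====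

-- proof-side: the month table read as a first-match association lookup
def monthGetP : List (List Char × List Char) → List Char → Option (List Char)
  | [], _ => none
  | (k, v) :: rest, key => if key = k then some v else monthGetP rest key

-- proof-side: names paired with their formatted month number, starting at position i
def pairUpP : List (List Char) → Nat → List (List Char × List Char)
  | [], _ => []
  | m :: rest, i => (m, fmt2B (i + 1)) :: pairUpP rest (i + 1)

theorem idxB_getP (N : List (List Char)) :
    ∀ (i : Nat) (k : List Char),
      (idxB N i k).map (fun j => fmt2B (j + 1)) = monthGetP (pairUpP N i) k := by
  induction N with
  | nil => intro i k; rfl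
  | cons m rest ih =>
    intro i k
    simp only [idxB, pairUpP, monthGetP]
    by_cases h : k = m
    · simp [h]
    · simp [h, ih]

-- B's index-and-format lookup computes A's table lookup
theorem idxB_eq_monthGetP (k : List Char) :
    (idxB monthNamesB 0 k).map (fun i => fmt2B (i + 1)) = monthGetP monthPairsA k := by
  rw [show monthPairsA = pairUpP monthNamesB 0 from by decide]
  exact idxB_getP monthNamesB 0 k

-- the first guard: ddf[2:3] == '1'  ↔  len(ddf) > 2 and ddf[2] == '1'
theorem slice23_eq_one_iff (ddf : List Char) :
    PySem.List.slice ddf (some 2) (some 3) = ['1'] ↔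
      2 < ddf.length ∧ PySem.List.pyGet? ddf 2 = some '1' := by
  have h := PySem.List.slice_natCast (xs := ddf) (a := 2) (b := 3)
  norm_num at h
  rw [h]
  have hget : PySem.List.pyGet? ddf 2 = ddf[2]? := by simp [pysem]
  rw [hget]
  norm_num [List.take_one, List.head?_drop]
  intro h1
  exact (List.getElem?_eq_some_iff.mp h1).1

-- Python str.replace for a nonempty pattern, as a plain structural recursion (proof-side model)
def repl (key val : List Char) : List Char → List Char
  | [] => []
  | c :: t =>
    if key.isPrefixOf (c :: t) then val ++ repl key val (List.drop (key.length - 1) t)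
    else c :: repl key val t
termination_by l => l.length
decreasing_by
  · simp only [List.length_cons, List.length_drop]; omega
  · simp only [List.length_cons]; omega

-- the replace chain over an association list
def chainP (P : List (List Char × List Char)) (l : List Char) : List Char :=
  P.foldl (fun s p => repl p.1 p.2 s) l

theorem replace_go_eq (key val : List Char) (hk : key ≠ []) :
    ∀ (fuel : Nat) (l acc : List Char), l.length ≤ fuel →
      PySem.Chars.replace.go key val fuel l acc = acc.reverse ++ repl key val l := by
  intro fuel
  induction fuel with
  | zero =>
    intro l acc hl
    have : l = [] := List.eq_nil_of_length_eq_zero (Nat.le_zero.mp hl)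
    subst this
    simp [PySem.Chars.replace.go, repl]
  | succ m ih =>
    intro l acc hl
    cases l with
    | nil => simp [PySem.Chars.replace.go, repl]
    | cons c t =>
      by_cases hp : key.isPrefixOf (c :: t)
      · cases key with
        | nil => exact absurd rfl hk
        | cons k0 kt =>
          have hdrop : List.drop (k0 :: kt).length (c :: t) =
              List.drop ((k0 :: kt).length - 1) t := by
            simp
          have hlen : (List.drop ((k0 :: kt).length - 1) t).length ≤ m := by
            simp only [List.length_drop]
            simp only [List.length_cons] at hl
            omega
          simp only [PySem.Chars.replace.go, hp, if_pos]
          rw [hdrop, ih _ _ hlen]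
          simp [repl, hp, List.append_assoc]
      · have hlen : t.length ≤ m := by
          simp only [List.length_cons] at hl; omega
        simp only [PySem.Chars.replace.go, hp, if_neg, Bool.false_eq_true, not_false_iff]
        rw [ih _ _ hlen]
        simp [repl, hp]

theorem replace_eq_repl (s key val : List Char) (hk : key ≠ []) :
    PySem.Chars.replace s key val = repl key val s := by
  have hne : key.isEmpty = false := by
    cases key with
    | nil => exact absurd rfl hk
    | cons a b => rfl
  rw [PySem.Chars.replace, hne]
  rw [replace_go_eq key val hk s.length s [] (le_refl _)]
  simp

theorem repl_of_not_isIn (key val s : List Char) (h : PySem.Chars.isIn key s = false) :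
    repl key val s = s := by
  rw [PySem.Chars.isIn_eq_false_iff] at h
  induction s with
  | nil => simp [repl]
  | cons c t ih =>
    have hp : ¬ key.isPrefixOf (c :: t) := fun hpre =>
      h ((List.isPrefixOf_iff_prefix.mp hpre).isInfix)
    rw [repl, if_neg hp, ih (fun hinf => h (List.infix_cons hinf))]

-- ¬ k' matches at offsets 0, 1, 2 of front ++ X, for 3-char front and k', independently of X
abbrev noOv (front k' : List Char) : Prop :=
  front ≠ k' ∧ front.drop 1 ≠ k'.take 2 ∧ front.drop 2 ≠ k'.take 1

theorem repl_front_pass (front k' v' : List Char) (hf : front.length = 3) (hk : k'.length = 3)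
    (h : noOv front k') (X : List Char) :
    repl k' v' (front ++ X) = front ++ repl k' v' X := by
  obtain ⟨a, b, c, rfl⟩ := List.length_eq_three.mp hf
  obtain ⟨d, e, f, rfl⟩ := List.length_eq_three.mp hk
  obtain ⟨h0, h1, h2⟩ := h
  have hp0 : ¬ [d, e, f].isPrefixOf (a :: b :: c :: X) := by
    intro hp
    simp only [List.isPrefixOf, Bool.and_eq_true, beq_iff_eq] at hp
    exact h0 (by simp [hp.1, hp.2.1, hp.2.2.1])
  have hp1 : ¬ [d, e, f].isPrefixOf (b :: c :: X) := by
    intro hp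
    simp only [List.isPrefixOf, Bool.and_eq_true, beq_iff_eq] at hp
    exact h1 (by simp [hp.1, hp.2.1])
  have hp2 : ¬ [d, e, f].isPrefixOf (c :: X) := by
    intro hp
    simp only [List.isPrefixOf, Bool.and_eq_true, beq_iff_eq] at hp
    exact h2 (by simp [hp.1])
  rw [List.cons_append, List.cons_append, List.cons_append, List.nil_append]
  rw [repl, if_neg hp0, repl, if_neg hp1, repl, if_neg hp2]
  rfl

theorem repl_front_hit (key val : List Char) (hk : key.length = 3) (X : List Char) :
    repl key val (key ++ X) = val ++ repl key val X := by
  obtain ⟨a, b, c, rfl⟩ := List.length_eq_three.mp hk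
  have hp : [a, b, c].isPrefixOf (a :: b :: c :: X) := by
    simp [List.isPrefixOf]
  rw [List.cons_append, List.cons_append, List.cons_append, List.nil_append]
  rw [repl, if_pos hp]
  rfl

theorem chainP_nil (P : List (List Char × List Char)) : chainP P [] = [] := by
  induction P with
  | nil => rfl
  | cons p P ih => simp only [chainP, List.foldl_cons] at ih ⊢; rw [repl]; exact ih

theorem chainP_front_pass (P : List (List Char × List Char)) (front : List Char)
    (hf : front.length = 3) (h : ∀ p ∈ P, p.1.length = 3 ∧ noOv front p.1) (X : List Char) :
    chainP P (front ++ X) = front ++ chainP P X := by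
  induction P generalizing X with
  | nil => rfl
  | cons p P ih =>
    obtain ⟨hp3, hpo⟩ := h p List.mem_cons_self
    show chainP P (repl p.1 p.2 (front ++ X)) = front ++ chainP P (repl p.1 p.2 X)
    rw [repl_front_pass front p.1 p.2 hf hp3 hpo X]
    exact ih (fun q hq => h q (List.mem_cons_of_mem _ hq)) _

theorem monthGetP_mem {P : List (List Char × List Char)} {k v : List Char}
    (h : monthGetP P k = some v) : (k, v) ∈ P := by
  induction P with
  | nil => simp [monthGetP] at h
  | cons p P ih =>
    obtain ⟨k1, v1⟩ := p
    rw [monthGetP] at h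
    by_cases he : k = k1
    · rw [if_pos he] at h
      subst he
      cases h
      exact List.mem_cons_self
    · rw [if_neg he] at h
      exact List.mem_cons_of_mem _ (ih h)

theorem monthGetP_isSome_of_mem {P : List (List Char × List Char)} {k v : List Char}
    (h : (k, v) ∈ P) : monthGetP P k ≠ none := by
  induction P with
  | nil => simp at h
  | cons p P ih =>
    obtain ⟨k1, v1⟩ := p
    rw [monthGetP]
    by_cases he : k = k1
    · rw [if_pos he]; simp
    · rw [if_neg he]
      rcases List.mem_cons.mp h with heq | hmem
      · exact absurd (congrArg Prod.fst heq) he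
      · exact ih hmem

theorem chainP_hit (P : List (List Char × List Char))
    (hlen : ∀ p ∈ P, p.1.length = 3 ∧ p.2.length = 3)
    (hpw : P.Pairwise (fun q p => noOv p.1 q.1))
    (hv : ∀ p ∈ P, ∀ q ∈ P, noOv p.2 q.1) :
    ∀ (k v X : List Char), monthGetP P k = some v →
      chainP P (k ++ X) = v ++ chainP P X := by
  induction P with
  | nil => intro k v X h; simp [monthGetP] at h
  | cons p P ih =>
    intro k v X h
    obtain ⟨k1, v1⟩ := p
    rw [monthGetP] at h
    by_cases he : k = k1
    · subst he
      rw [if_pos rfl] at h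
      injection h with hv1
      subst hv1
      show chainP P (repl k v1 (k ++ X)) = v1 ++ chainP P (repl k v1 X)
      rw [repl_front_hit k v1 (hlen _ List.mem_cons_self).1 X]
      exact chainP_front_pass P v1 (hlen _ List.mem_cons_self).2
        (fun q hq => ⟨(hlen q (List.mem_cons_of_mem _ hq)).1,
          hv _ List.mem_cons_self q (List.mem_cons_of_mem _ hq)⟩) _
    · rw [if_neg he] at h
      have hkmem : (k, v) ∈ P := monthGetP_mem h
      have hno : noOv k k1 := by
        have := (List.pairwise_cons.mp hpw).1 (k, v) hkmem
        exact this
      show chainP P (repl k1 v1 (k ++ X)) = v ++ chainP P (repl k1 v1 X)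
      rw [repl_front_pass k k1 v1 (hlen _ (List.mem_cons_of_mem _ hkmem)).1
        (hlen _ List.mem_cons_self).1 hno X]
      exact ih (fun q hq => hlen q (List.mem_cons_of_mem _ hq))
        (List.pairwise_cons.mp hpw).2
        (fun q hq r hr => hv q (List.mem_cons_of_mem _ hq) r (List.mem_cons_of_mem _ hr))
        k v _ h

-- first two characters of Y agree with those of X, except where a (non-letter) replacement landed
def twoOK (X Y : List Char) : Prop :=
  (Y[0]? = X[0]? ∨ ∃ d, Y[0]? = some d ∧ d.isAlpha = false) ∧
  (Y[1]? = X[1]? ∨ ∃ d, Y[1]? = some d ∧ d.isAlpha = false)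

theorem twoOK_refl (X : List Char) : twoOK X X := ⟨Or.inl rfl, Or.inl rfl⟩

theorem twoOK_trans {X Y Z : List Char} (h1 : twoOK X Y) (h2 : twoOK Y Z) : twoOK X Z := by
  obtain ⟨a1, b1⟩ := h1
  obtain ⟨a2, b2⟩ := h2
  constructor
  · rcases a2 with h | h
    · rcases a1 with h' | h'
      · exact Or.inl (h.trans h')
      · exact Or.inr (h ▸ h')
    · exact Or.inr h
  · rcases b2 with h | h
    · rcases b1 with h' | h'
      · exact Or.inl (h.trans h')
      · exact Or.inr (h ▸ h')
    · exact Or.inr h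

theorem twoOK_repl (key val Y : List Char) (hv3 : val.length = 3)
    (hva : ∀ d ∈ val, d.isAlpha = false) : twoOK Y (repl key val Y) := by
  obtain ⟨x, y, z, rfl⟩ := List.length_eq_three.mp hv3
  have hx : x.isAlpha = false := hva x (by simp)
  have hy : y.isAlpha = false := hva y (by simp)
  cases Y with
  | nil => simp only [repl]; exact twoOK_refl []
  | cons c t =>
    by_cases hp : key.isPrefixOf (c :: t)
    · rw [repl, if_pos hp]
      exact ⟨Or.inr ⟨x, by simp, hx⟩, Or.inr ⟨y, by simp, hy⟩⟩
    · rw [repl, if_neg hp]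
      refine ⟨Or.inl (by simp), ?_⟩
      cases t with
      | nil => simp [repl]
      | cons c1 t1 =>
        by_cases hp1 : key.isPrefixOf (c1 :: t1)
        · rw [repl, if_pos hp1]
          exact Or.inr ⟨x, by simp, hx⟩
        · rw [repl, if_neg hp1]
          exact Or.inl (by simp)

theorem no_front_match (key : List Char) (hk : key.length = 3)
    (hka : ∀ d ∈ key, d.isAlpha = true) {c : Char} {t Y : List Char} (htY : twoOK t Y)
    (h : ¬ key.isPrefixOf (c :: t)) : ¬ key.isPrefixOf (c :: Y) := by
  obtain ⟨d, e, f, rfl⟩ := List.length_eq_three.mp hk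
  intro hp
  obtain ⟨r, hr⟩ := List.isPrefixOf_iff_prefix.mp hp
  have hdc : d = c := by
    have := congrArg (·[0]?) hr
    simpa using this
  have hY0 : Y[0]? = some e ∧ Y[1]? = some f := by
    have h1 := congrArg (·[1]?) hr
    have h2 := congrArg (·[2]?) hr
    simp at h1 h2
    exact ⟨h1.symm, h2.symm⟩
  have ht0 : t[0]? = some e := by
    rcases htY.1 with hh | ⟨d', hd', hna⟩
    · rw [← hh, hY0.1]
    · rw [hY0.1] at hd'
      cases hd'
      exact absurd (hka e (by simp)) (by simp [hna])
  have ht1 : t[1]? = some f := by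
    rcases htY.2 with hh | ⟨d', hd', hna⟩
    · rw [← hh, hY0.2]
    · rw [hY0.2] at hd'
      cases hd'
      exact absurd (hka f (by simp)) (by simp [hna])
  apply h
  cases t with
  | nil => simp at ht0
  | cons a t' =>
    cases t' with
    | nil => simp at ht1
    | cons b t'' =>
      simp only [List.getElem?_cons_zero, Option.some.injEq] at ht0
      simp only [List.getElem?_cons_succ, List.getElem?_cons_zero, Option.some.injEq] at ht1
      subst ht0 ht1 hdc
      exact List.isPrefixOf_iff_prefix.mpr ⟨t'', rfl⟩

theorem chainP_no_match (P : List (List Char × List Char))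
    (hl : ∀ p ∈ P, p.1.length = 3 ∧ p.2.length = 3 ∧
          (∀ d ∈ p.1, d.isAlpha = true) ∧ (∀ d ∈ p.2, d.isAlpha = false))
    (c : Char) (t : List Char) (hnm : ∀ p ∈ P, ¬ p.1.isPrefixOf (c :: t)) :
    ∀ Y, twoOK t Y → chainP P (c :: Y) = c :: chainP P Y ∧ twoOK t (chainP P Y) := by
  induction P with
  | nil => intro Y hY; exact ⟨rfl, hY⟩
  | cons p P ih =>
    intro Y hY
    obtain ⟨h1, h2, h3, h4⟩ := hl p List.mem_cons_self
    have hnp : ¬ p.1.isPrefixOf (c :: Y) :=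
      no_front_match p.1 h1 h3 hY (hnm p List.mem_cons_self)
    have hstep : repl p.1 p.2 (c :: Y) = c :: repl p.1 p.2 Y := by
      rw [repl, if_neg hnp]
    have hY' : twoOK t (repl p.1 p.2 Y) :=
      twoOK_trans hY (twoOK_repl p.1 p.2 Y h2 h4)
    have := ih (fun q hq => hl q (List.mem_cons_of_mem _ hq))
      (fun q hq => hnm q (List.mem_cons_of_mem _ hq)) (repl p.1 p.2 Y) hY'
    exact ⟨by show chainP P (repl p.1 p.2 (c :: Y)) = _; rw [hstep]; exact this.1, this.2⟩

theorem factsA : ∀ p ∈ monthPairsA, p.1.length = 3 ∧ p.2.length = 3 ∧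
    (∀ d ∈ p.1, d.isAlpha = true) ∧ (∀ d ∈ p.2, d.isAlpha = false) := by
  intro p hp
  fin_cases hp <;>
    exact ⟨by decide, by decide,
      fun d hd => by fin_cases hd <;> decide,
      fun d hd => by fin_cases hd <;> decide⟩

theorem factsPW : monthPairsA.Pairwise (fun q p => noOv p.1 q.1) := by decide

theorem factsV : ∀ p ∈ monthPairsA, ∀ q ∈ monthPairsA, noOv p.2 q.1 := by
  intro p hp q hq
  fin_cases hp <;> fin_cases hq <;> decide

set_option maxHeartbeats 1000000 in
theorem chain_eq_scan : ∀ (n : Nat) (l : List Char), l.length ≤ n →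
    chainP monthPairsA l = scanB l := by
  intro n
  induction n using Nat.strong_induction_on with
  | _ n ih =>
    intro l hl
    cases l with
    | nil => rw [chainP_nil, scanB]
    | cons c t =>
      cases hmatch : idxB monthNamesB 0 (List.take 3 (c :: t)) with
      | some k =>
        have hmatchA : monthGetP monthPairsA (List.take 3 (c :: t)) = some (fmt2B (k + 1)) := by
          rw [← idxB_eq_monthGetP, hmatch]; rfl
        have hmem : (List.take 3 (c :: t), fmt2B (k + 1)) ∈ monthPairsA := monthGetP_mem hmatchA
        have hk3 : (List.take 3 (c :: t)).length = 3 := (factsA _ hmem).1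
        have hlen3 : 3 ≤ (c :: t).length := by
          rw [List.length_take] at hk3; omega
        have hchain : chainP monthPairsA (c :: t) =
            fmt2B (k + 1) ++ chainP monthPairsA (List.drop 3 (c :: t)) := by
          conv_lhs => rw [← List.take_append_drop 3 (c :: t)]
          exact chainP_hit monthPairsA (fun p hp => ⟨(factsA p hp).1, (factsA p hp).2.1⟩)
            factsPW factsV _ _ _ hmatchA
        have hrec : chainP monthPairsA (List.drop 3 (c :: t)) = scanB (List.drop 3 (c :: t)) := by
          apply ih (n - 1) (by simp at hl ⊢; omega)
          simp only [List.length_drop]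
          simp only [List.length_cons] at hl hlen3 ⊢
          omega
        have hscan : scanB (c :: t) = fmt2B (k + 1) ++ scanB (List.drop 2 t) := by
          rw [scanB, hmatch]
        rw [hchain, hrec, hscan]
        norm_num
      | none =>
        have hmatchA : monthGetP monthPairsA (List.take 3 (c :: t)) = none := by
          rw [← idxB_eq_monthGetP, hmatch]; rfl
        have hnm : ∀ p ∈ monthPairsA, ¬ p.1.isPrefixOf (c :: t) := by
          intro p hp hpre
          have h3 : p.1.length = 3 := (factsA p hp).1
          have : p.1 = List.take 3 (c :: t) := by
            have := List.prefix_iff_eq_take.mp (List.isPrefixOf_iff_prefix.mp hpre)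
            rw [← h3]; exact this
          exact monthGetP_isSome_of_mem (P := monthPairsA) (k := List.take 3 (c :: t))
            (v := p.2) (by rw [← this]; exact hp) hmatchA
        have := chainP_no_match monthPairsA factsA c t hnm t (twoOK_refl t)
        have hrec : chainP monthPairsA t = scanB t := by
          apply ih (n - 1) ?_ t ?_ <;> simp only [List.length_cons] at hl <;> omega
        have hscan : scanB (c :: t) = c :: scanB t := by
          rw [scanB, hmatch]
        rw [this.1, hrec, hscan]

theorem loopA_eq_chain (ddf : List Char) : symbolLoopA ddf = chainP monthPairsA ddf := by
  unfold symbolLoopA chainP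
  apply PySem.List.foldl_congr_mem
  intro acc p hp
  have hne : p.1 ≠ [] := by
    intro h0
    have := (factsA p hp).1
    rw [h0] at this
    simp at this
  by_cases hin : PySem.Chars.isIn p.1 acc
  · rw [if_pos hin, replace_eq_repl acc p.1 p.2 hne]
  · rw [if_neg hin, repl_of_not_isIn p.1 p.2 acc (by simpa using hin)]

theorem coreA_eq_coreB (ddf : List Char) : symbolCoreA ddf = symbolCoreB ddf := by
  unfold symbolCoreA symbolCoreB
  by_cases h1 : 2 < ddf.length ∧ PySem.List.pyGet? ddf 2 = some '1'
  · rw [if_pos h1, if_pos ((slice23_eq_one_iff ddf).mpr h1)]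
  · rw [if_neg h1, if_neg (fun hc => h1 ((slice23_eq_one_iff ddf).mp hc))]
    by_cases h2 : PySem.Chars.isIn ['-'] ddf
    · rw [if_pos h2, if_pos h2]
    · rw [if_neg h2, if_neg h2, loopA_eq_chain]
      exact chain_eq_scan ddf.length ddf (le_refl _)

-- ===== VERDICT (by name: the statement is the Claim_ definition above) =====
theorem symbol_spec : Claim_equal_symbol := by
  intro part sym _ _
  show symbol part sym = symbol_alt part sym
  cases hs : PySem.Chars.split? part.toList sym.toList with
  | none => simp only [symbol, symbol_alt, hs, Option.bind]
  | some parts =>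
    cases hg : PySem.List.pyGet? parts 1 with
    | none => simp only [symbol, symbol_alt, hs, hg, Option.bind]
    | some ddf => simp only [symbol, symbol_alt, hs, hg, Option.bind, coreA_eq_coreB]
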